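-- pv_equiv track=rewrite | github.com/Kathy331/resume-ai-agents | agents/research_engine/intelligent_research_engine.py | _analyze_research_gaps
-- ===== SOURCE A (Python) =====
-- from typing import Dict, List, Any, Optional
--
-- def _analyze_research_gaps(research_data: Dict[str, Any],
--                          entities: Dict[str, Any]) -> List[Dict[str, str]]:
--     """Analyze current research to identify gaps"""
--
--     gaps = []
--
--     # Check interviewer research quality
--     interviewer_name = entities.get('interviewer', '')
--     if interviewer_name and interviewer_name != 'Not specified':
--         # Check if we found the actual interviewer's LinkedIn profile
--         citations = research_data.get('citations_database', {})
--         interviewer_found = False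
--
--         for citation_data in citations.values():
--             if isinstance(citation_data, dict):
--                 source = citation_data.get('source', '').lower()
--                 if 'linkedin.com/in/' in source and interviewer_name.lower() in source:
--                     interviewer_found = True
--                     break
--
--         if not interviewer_found:
--             gaps.append({
--                 'type': 'interviewer_profile',
--                 'description': f'No LinkedIn profile found for {interviewer_name}',
--                 'priority': 'high',
--                 'target': interviewer_name
--             })
--
--     # Check company research depth
--     company_name = entities.get('company', '')
--     if company_name:
--         company_citations = 0
--         for citation_data in research_data.get('citations_database', {}).values():
--             if isinstance(citation_data, dict):
--                 source = citation_data.get('source', '').lower()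
--                 if company_name.lower() in source and 'linkedin.com/company/' in source:
--                     company_citations += 1
--
--         if company_citations < 2:
--             gaps.append({
--                 'type': 'company_depth',
--                 'description': f'Insufficient company information for {company_name}',
--                 'priority': 'medium',
--                 'target': company_name
--             })
--
--     return gaps
-- ===== SOURCE B (Python) =====
-- from typing import Dict, List, Any
--
-- def _analyze_research_gaps(research_data: Dict[str, Any],
--                          entities: Dict[str, Any]) -> List[Dict[str, str]]:
--     """Single pass over the citations computing both facts, then emit gaps."""
--     interviewer_name = entities.get('interviewer', '')
--     company_name = entities.get('company', '')
--     want_interviewer = bool(interviewer_name) and interviewer_name != 'Not specified'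
--     iname_low = interviewer_name.lower()
--     cname_low = company_name.lower()
--
--     interviewer_found = False
--     company_citations = 0
--     for citation_data in research_data.get('citations_database', {}).values():
--         if not isinstance(citation_data, dict):
--             continue
--         source = citation_data.get('source', '').lower()
--         if want_interviewer and 'linkedin.com/in/' in source and iname_low in source:
--             interviewer_found = True
--         if company_name and cname_low in source and 'linkedin.com/company/' in source:
--             company_citations += 1
--
--     gaps = []
--     if want_interviewer and not interviewer_found:
--         gaps.append({
--             'type': 'interviewer_profile',
--             'description': f'No LinkedIn profile found for {interviewer_name}',
--             'priority': 'high',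
--             'target': interviewer_name
--         })
--     if company_name and company_citations < 2:
--         gaps.append({
--             'type': 'company_depth',
--             'description': f'Insufficient company information for {company_name}',
--             'priority': 'medium',
--             'target': company_name
--         })
--     return gaps
-- ===== Notes on version B (the rewrite author's own statement) =====
-- stated objective: alternative
-- what changed: A scans the citations twice (an early-break search for the interviewer's LinkedIn profile, then a separate counting loop for company citations); B makes one pass maintaining a (found, count) pair and appends the two gap records afterwards.
import Mathlib
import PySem

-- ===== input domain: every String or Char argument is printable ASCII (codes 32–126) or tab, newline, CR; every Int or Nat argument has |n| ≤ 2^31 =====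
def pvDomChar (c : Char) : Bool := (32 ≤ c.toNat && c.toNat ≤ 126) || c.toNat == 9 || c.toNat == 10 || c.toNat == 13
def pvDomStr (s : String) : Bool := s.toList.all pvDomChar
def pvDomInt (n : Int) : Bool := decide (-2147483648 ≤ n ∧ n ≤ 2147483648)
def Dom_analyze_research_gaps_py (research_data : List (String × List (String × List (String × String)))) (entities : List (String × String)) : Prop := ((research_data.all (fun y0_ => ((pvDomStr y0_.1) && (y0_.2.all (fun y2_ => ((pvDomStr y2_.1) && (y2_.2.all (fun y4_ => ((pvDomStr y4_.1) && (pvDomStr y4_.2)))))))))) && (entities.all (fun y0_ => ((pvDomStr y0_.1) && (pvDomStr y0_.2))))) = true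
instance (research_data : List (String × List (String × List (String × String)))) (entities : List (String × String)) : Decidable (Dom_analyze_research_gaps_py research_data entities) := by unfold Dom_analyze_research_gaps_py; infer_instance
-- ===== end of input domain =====

-- dict → association list (first-match lookup, PYSEM type convention); shared primitive
def pvGetD {ν : Type} (d : List (String × ν)) (k : String) (dflt : ν) : ν :=
  match d.find? (fun p => p.1 == k) with
  | some p => p.2
  | none => dflt

-- B replaces A's two separate scans of the citations (one with an early break, one counting)
-- by a single pass maintaining a (found, count) pair; objective: alternative decomposition, same cost.

-- ===== PORT A =====
-- A's gap records (insertion-order dicts)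
def pvGapInterviewer (name : String) : List (String × String) :=
  [("type", "interviewer_profile"),
   ("description", "No LinkedIn profile found for " ++ name),
   ("priority", "high"),
   ("target", name)]

def pvGapCompany (name : String) : List (String × String) :=
  [("type", "company_depth"),
   ("description", "Insufficient company information for " ++ name),
   ("priority", "medium"),
   ("target", name)]

-- A's first loop: 'for citation_data in citations.values(): … break' (the isinstance check is
-- always true at this type, so it vanishes)
def pvFindInterviewerA (iname : String) : List (List (String × String)) → Bool
  | [] => false
  | cd :: rest =>
      let source := PySem.Str.lower (pvGetD cd "source" "")
      if PySem.Str.isIn "linkedin.com/in/" source && PySem.Str.isIn (PySem.Str.lower iname) source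
      then true
      else pvFindInterviewerA iname rest

def analyze_research_gaps_py (research_data : List (String × List (String × List (String × String)))) (entities : List (String × String)) : List (List (String × String)) :=
  let gaps : List (List (String × String)) := []
  let interviewer_name := pvGetD entities "interviewer" ""
  let gaps :=
    if interviewer_name != "" && interviewer_name != "Not specified" then
      let citations := pvGetD research_data "citations_database" []
      let interviewer_found := pvFindInterviewerA interviewer_name (citations.map Prod.snd)
      if !interviewer_found then gaps ++ [pvGapInterviewer interviewer_name] else gaps
    else gaps
  let company_name := pvGetD entities "company" ""
  let gaps :=
    if company_name != "" then
      let company_citations :=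
        ((pvGetD research_data "citations_database" []).map Prod.snd).foldl
          (fun (n : Int) cd =>
            let source := PySem.Str.lower (pvGetD cd "source" "")
            if PySem.Str.isIn (PySem.Str.lower company_name) source &&
               PySem.Str.isIn "linkedin.com/company/" source
            then n + 1 else n) 0
      if company_citations < 2 then gaps ++ [pvGapCompany company_name] else gaps
    else gaps
  gaps

-- ===== PORT B =====
def analyze_research_gaps_py_alt (research_data : List (String × List (String × List (String × String)))) (entities : List (String × String)) : List (List (String × String)) :=
  let interviewer_name := pvGetD entities "interviewer" ""
  let company_name := pvGetD entities "company" ""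
  let want_interviewer : Bool := interviewer_name != "" && interviewer_name != "Not specified"
  let iname_low := PySem.Str.lower interviewer_name
  let cname_low := PySem.Str.lower company_name
  let st :=
    ((pvGetD research_data "citations_database" []).map Prod.snd).foldl
      (fun (st : Bool × Int) cd =>
        let source := PySem.Str.lower (pvGetD cd "source" "")
        (st.1 || (want_interviewer && PySem.Str.isIn "linkedin.com/in/" source &&
                  PySem.Str.isIn iname_low source),
         st.2 + (if company_name != "" && PySem.Str.isIn cname_low source &&
                    PySem.Str.isIn "linkedin.com/company/" source then 1 else 0)))
      (false, (0 : Int))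
  (if want_interviewer && !st.1 then [pvGapInterviewer interviewer_name] else []) ++
  (if company_name != "" && st.2 < 2 then [pvGapCompany company_name] else [])

-- ===== PRECONDITION & SPEC =====
def Spec_analyze_research_gaps_py (research_data : List (String × List (String × List (String × String)))) (entities : List (String × String)) (out : List (List (String × String))) : Prop := out = analyze_research_gaps_py_alt research_data entities
instance (research_data : List (String × List (String × List (String × String)))) (entities : List (String × String)) (out : List (List (String × String))) : Decidable (Spec_analyze_research_gaps_py research_data entities out) := by unfold Spec_analyze_research_gaps_py; infer_instance

-- ===== CLAIM (what is proved, stated in full; the proofs are below) =====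
def Claim_equal_analyze_research_gaps_py : Prop := ∀ (research_data : List (String × List (String × List (String × String)))) (entities : List (String × String)), Dom_analyze_research_gaps_py research_data entities → Spec_analyze_research_gaps_py research_data entities (analyze_research_gaps_py research_data entities)

-- ===== LEMMAS AND PROOFS =====

-- B's paired fold splits into its two components.
theorem pvFoldPair (p : List (String × String) → Bool) (q : List (String × String) → Bool)
    (vs : List (List (String × String))) (b : Bool) (c : Int) :
    vs.foldl (fun (st : Bool × Int) cd => (st.1 || p cd, st.2 + (if q cd then 1 else 0))) (b, c)
      = (vs.foldl (fun x cd => x || p cd) b, vs.foldl (fun x cd => x + (if q cd then 1 else 0)) c) := by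
  induction vs generalizing b c with
  | nil => rfl
  | cons hd tl ih => simp [List.foldl, ih]

theorem pvFoldOr (p : List (String × String) → Bool) (vs : List (List (String × String))) (b : Bool) :
    vs.foldl (fun x cd => x || p cd) b = (b || vs.any p) := by
  induction vs generalizing b with
  | nil => simp
  | cons hd tl ih => simp [List.foldl, ih, Bool.or_assoc]

-- A's break-loop is List.any of its test.
theorem pvFindA_eq_any (iname : String) (vs : List (List (String × String))) :
    pvFindInterviewerA iname vs
      = vs.any (fun cd =>
          let source := PySem.Str.lower (pvGetD cd "source" "")
          PySem.Str.isIn "linkedin.com/in/" source && PySem.Str.isIn (PySem.Str.lower iname) source) := by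
  induction vs with
  | nil => rfl
  | cons hd tl ih =>
      simp only [pvFindInterviewerA, List.any_cons]
      split <;> simp_all

theorem pvFoldCount_addIf (q : List (String × String) → Bool)
    (vs : List (List (String × String))) (c : Int) :
    vs.foldl (fun n cd => if q cd then n + 1 else n) c
      = vs.foldl (fun x cd => x + (if q cd then 1 else 0)) c := by
  induction vs generalizing c with
  | nil => rfl
  | cons hd tl ih => by_cases h : q hd <;> simp [List.foldl, h, ih]

-- ===== VERDICT (by name: the statement is the Claim_ definition above) =====
theorem analyze_research_gaps_py_spec : Claim_equal_analyze_research_gaps_py := by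
  intro rd ents _
  unfold Spec_analyze_research_gaps_py analyze_research_gaps_py analyze_research_gaps_py_alt
  simp only [pvFoldPair, pvFoldOr, pvFindA_eq_any, pvFoldCount_addIf, Bool.false_or]
  set iname := pvGetD ents "interviewer" "" with hi
  set cname := pvGetD ents "company" "" with hc
  set vs := (pvGetD rd "citations_database" []).map Prod.snd with hv
  cases hW : (iname != "" && iname != "Not specified") <;>
    cases hC : (cname != "") <;>
      simp only [Bool.true_and, Bool.false_and, if_true, if_false,
        Bool.false_eq_true, List.nil_append, List.append_nil] <;>
      first
      | rfl
      | (split <;> simp_all)
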